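-- pv_equiv track=rewrite | github.com/hherb/bmlibrarian | scripts/llmpdflab.py | calculate_context_length
-- ===== SOURCE A (Python) =====
-- CHARS_PER_TOKEN = 4  # Rough estimate: ~4 characters per token
--
-- TOKEN_RESERVE_RATIO = 1.5  # Reserve 50% extra for output and overhead
--
-- MIN_CONTEXT_LENGTH = 4096  # Minimum context length
--
-- MAX_CONTEXT_LENGTH = 131072  # Maximum context length (128K)
--
-- def estimate_tokens(text: str) -> int:
--     """
--     Estimate the number of tokens in text.
--
--     Uses a simple character-based estimation (roughly 4 chars per token).
--
--     Args:
--         text: Input text.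
--
--     Returns:
--         Estimated token count.
--     """
--     return max(1, len(text) // CHARS_PER_TOKEN)
--
-- def calculate_context_length(input_text: str, prompt: str) -> int:
--     """
--     Calculate the required context length for LLM processing.
--
--     Takes into account input tokens, prompt tokens, and reserves space
--     for output tokens.
--
--     Args:
--         input_text: The text to be processed.
--         prompt: The system prompt.
--
--     Returns:
--         Recommended context length (num_ctx value).
--     """
--     input_tokens = estimate_tokens(input_text)
--     prompt_tokens = estimate_tokens(prompt)
--     total_input = input_tokens + prompt_tokens
--
--     # Reserve space for output (assume output is similar size to input)
--     required_tokens = int(total_input * TOKEN_RESERVE_RATIO) + input_tokens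
--
--     # Clamp to reasonable bounds
--     context_length = max(MIN_CONTEXT_LENGTH, min(required_tokens, MAX_CONTEXT_LENGTH))
--
--     # Round up to nearest power of 2 for efficiency
--     power = 1
--     while power < context_length:
--         power *= 2
--
--     return min(power, MAX_CONTEXT_LENGTH)
-- ===== SOURCE B (Python) =====
-- CHARS_PER_TOKEN = 4
-- TOKEN_RESERVE_RATIO = 1.5
-- MIN_CONTEXT_LENGTH = 4096
-- MAX_CONTEXT_LENGTH = 131072
--
-- def _estimate_tokens(text):
--     return max(1, len(text) // CHARS_PER_TOKEN)
--
-- def calculate_context_length(input_text, prompt):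
--     input_tokens = _estimate_tokens(input_text)
--     prompt_tokens = _estimate_tokens(prompt)
--     total_input = input_tokens + prompt_tokens
--     required_tokens = int(total_input * TOKEN_RESERVE_RATIO) + input_tokens
--     context_length = max(MIN_CONTEXT_LENGTH, min(required_tokens, MAX_CONTEXT_LENGTH))
--     # closed-form next power of two (context_length >= 4096 >= 1, so this is exact)
--     power = 1 << (context_length - 1).bit_length()
--     return min(power, MAX_CONTEXT_LENGTH)
-- ===== Notes on version B (the rewrite author's own statement) =====
-- stated objective: simpler
-- what changed: The while-doubling search for the next power of two is replaced by closed-form bit arithmetic: power = 1 << (context_length - 1).bit_length(), removing the loop.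
import Mathlib
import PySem

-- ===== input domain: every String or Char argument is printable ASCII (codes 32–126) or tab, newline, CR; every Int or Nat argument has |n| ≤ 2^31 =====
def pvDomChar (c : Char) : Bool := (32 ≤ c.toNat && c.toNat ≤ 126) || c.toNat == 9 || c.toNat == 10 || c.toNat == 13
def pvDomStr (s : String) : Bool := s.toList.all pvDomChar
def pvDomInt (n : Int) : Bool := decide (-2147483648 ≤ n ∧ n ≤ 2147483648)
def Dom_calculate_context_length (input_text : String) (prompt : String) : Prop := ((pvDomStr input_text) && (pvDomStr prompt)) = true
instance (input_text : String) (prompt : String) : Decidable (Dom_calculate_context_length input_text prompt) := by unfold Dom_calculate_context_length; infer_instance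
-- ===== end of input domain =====

-- B replaces A's while-doubling search for the next power of two by closed-form bit
-- arithmetic (1 << (n-1).bit_length()); objective: simpler.

-- ===== PORT A =====
def pvEstimateTokens (text : String) : Int :=
  max 1 (PySem.Int.floordiv (PySem.Str.len text) 4)

-- A's `power = 1; while power < context_length: power *= 2` loop
def pvPowLoop (ctx : Int) (power : Int) (h : 0 < power) : Int :=
  if power < ctx then pvPowLoop ctx (power * 2) (by omega) else power
termination_by (ctx - power).toNat
decreasing_by omega

def calculate_context_length (input_text : String) (prompt : String) : Int :=
  let input_tokens := pvEstimateTokens input_text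
  let prompt_tokens := pvEstimateTokens prompt
  let total_input := input_tokens + prompt_tokens
  -- int(total_input * 1.5): exact here since 0 < total_input ≤ 2^31-ish < 2^52, so the
  -- float product is the exact rational 3*total_input/2 and int() truncates (= floors, positive)
  let required_tokens := PySem.Int.floordiv (3 * total_input) 2 + input_tokens
  let context_length := max 4096 (min required_tokens 131072)
  min (pvPowLoop context_length 1 (by norm_num)) 131072

-- ===== PORT B =====
def pvEstimateTokensB (text : String) : Int :=
  max 1 (PySem.Int.floordiv (PySem.Str.len text) 4)

def calculate_context_length_alt (input_text : String) (prompt : String) : Int :=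
  let input_tokens := pvEstimateTokensB input_text
  let prompt_tokens := pvEstimateTokensB prompt
  let total_input := input_tokens + prompt_tokens
  -- int(total_input * 1.5), exact as above
  let required_tokens := PySem.Int.floordiv (3 * total_input) 2 + input_tokens
  let context_length := max 4096 (min required_tokens 131072)
  -- power = 1 << (context_length - 1).bit_length()
  let power := (2 : Int) ^ PySem.Int.bitLength (context_length - 1)
  min power 131072

-- ===== PRECONDITION & SPEC =====
def Spec_calculate_context_length (input_text : String) (prompt : String) (out : Int) : Prop := out = calculate_context_length_alt input_text prompt
instance (input_text : String) (prompt : String) (out : Int) : Decidable (Spec_calculate_context_length input_text prompt out) := by unfold Spec_calculate_context_length; infer_instance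

-- ===== CLAIM (what is proved, stated in full; the proofs are below) =====
def Claim_equal_calculate_context_length : Prop := ∀ (input_text : String) (prompt : String), Dom_calculate_context_length input_text prompt → Spec_calculate_context_length input_text prompt (calculate_context_length input_text prompt)

-- ===== LEMMAS AND PROOFS =====

theorem pvPowLoop_congr (ctx p q : Int) (h : 0 < p) (h' : 0 < q) (e : p = q) :
    pvPowLoop ctx p h = pvPowLoop ctx q h' := by subst e; rfl

-- bitLength characterisation: if 2^j < ctx ≤ 2^(j+1) then bitLength (ctx-1) = j+1
theorem pvBitLen_char (ctx : Int) (j : Nat) (h1 : (2:Int) ^ j < ctx) (h2 : ctx ≤ (2:Int) ^ (j+1)) :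
    PySem.Int.bitLength (ctx - 1) = j + 1 := by
  have hj1 : (1:Int) ≤ 2 ^ j := one_le_pow₀ (by norm_num)
  have hn0 : ctx - 1 ≠ 0 := by omega
  set bl := PySem.Int.bitLength (ctx - 1) with hbl
  have hub : (ctx - 1).natAbs < 2 ^ bl := PySem.Int.lt_two_pow_bitLength _
  have hlb : 2 ^ (bl - 1) ≤ (ctx - 1).natAbs := PySem.Int.two_pow_bitLength_le _ hn0
  have habs : ((ctx - 1).natAbs : Int) = ctx - 1 := Int.natAbs_of_nonneg (by omega)
  -- 2^j ≤ natAbs (ctx-1) < 2^(j+1), as Nats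
  have hlo : (2:Nat) ^ j ≤ (ctx - 1).natAbs := by
    have : (2:Int) ^ j ≤ ctx - 1 := by omega
    rw [← habs] at this; exact_mod_cast this
  have hhi : (ctx - 1).natAbs < (2:Nat) ^ (j+1) := by
    have : ctx - 1 < (2:Int) ^ (j+1) := by omega
    rw [← habs] at this; exact_mod_cast this
  have hjbl : j < bl := by
    have : (2:Nat) ^ j < 2 ^ bl := lt_of_le_of_lt hlo hub
    exact (Nat.pow_lt_pow_iff_right (by norm_num)).mp this
  have hble : bl - 1 < j + 1 := by
    have : (2:Nat) ^ (bl - 1) < 2 ^ (j+1) := lt_of_le_of_lt hlb hhi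
    exact (Nat.pow_lt_pow_iff_right (by norm_num)).mp this
  omega

-- the loop, started at a power of two below ctx, lands exactly on 2 ^ bitLength (ctx - 1)
theorem pvPowLoop_eq (ctx : Int) (hctx : 2 ≤ ctx) :
    ∀ (k j : Nat), PySem.Int.bitLength (ctx - 1) - j = k → (2:Int) ^ j < ctx →
      pvPowLoop ctx ((2:Int) ^ j) (by positivity) = (2:Int) ^ PySem.Int.bitLength (ctx - 1) := by
  intro k
  induction k using Nat.strong_induction_on with
  | _ k IH =>
    intro j hk hj
    rw [pvPowLoop]
    rw [if_pos hj]
    have hpow : (2:Int) ^ j * 2 = 2 ^ (j+1) := by ring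
    by_cases h2 : (2:Int) ^ (j+1) < ctx
    · -- keep looping
      have hjbl : j < PySem.Int.bitLength (ctx - 1) := by
        have := pvBitLen_char ctx j hj
        by_contra hge
        -- from ¬ j < bl derive contradiction via bounds
        have hn0 : ctx - 1 ≠ 0 := by
          have : (1:Int) ≤ 2 ^ j := one_le_pow₀ (by norm_num)
          omega
        have hub : (ctx - 1).natAbs < 2 ^ PySem.Int.bitLength (ctx - 1) := PySem.Int.lt_two_pow_bitLength _
        have habs : ((ctx - 1).natAbs : Int) = ctx - 1 := Int.natAbs_of_nonneg (by
          have : (1:Int) ≤ 2 ^ j := one_le_pow₀ (by norm_num); omega)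
        have hlo : (2:Nat) ^ j ≤ (ctx - 1).natAbs := by
          have hx : (2:Int) ^ j ≤ ctx - 1 := by omega
          rw [← habs] at hx; exact_mod_cast hx
        have : (2:Nat) ^ j < 2 ^ PySem.Int.bitLength (ctx - 1) := lt_of_le_of_lt hlo hub
        have := (Nat.pow_lt_pow_iff_right (by norm_num : 1 < 2)).mp this
        omega
      have hrec := IH (PySem.Int.bitLength (ctx - 1) - (j+1)) (by omega) (j+1) rfl h2
      rw [pvPowLoop_congr ctx _ _ _ (by positivity) hpow]
      exact hrec
    · -- done after this doubling
      rw [pvPowLoop_congr ctx _ _ _ (by positivity) hpow]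
      rw [pvPowLoop, if_neg h2]
      rw [pvBitLen_char ctx j hj (by omega)]

theorem pvKey (ctx : Int) (h : 4096 ≤ ctx) :
    min (pvPowLoop ctx 1 (by norm_num)) 131072
      = min ((2:Int) ^ PySem.Int.bitLength (ctx - 1)) 131072 := by
  have h0 : (2:Int) ^ 0 < ctx := by norm_num; omega
  have := pvPowLoop_eq ctx (by omega) (PySem.Int.bitLength (ctx - 1) - 0) 0 rfl h0
  rw [pvPowLoop_congr ctx _ _ _ (by norm_num) (pow_zero 2)] at this
  exact congrArg (fun x => min x 131072) this

-- ===== VERDICT (by name: the statement is the Claim_ definition above) =====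
theorem calculate_context_length_spec : Claim_equal_calculate_context_length := by
  intro input_text prompt _
  unfold Spec_calculate_context_length calculate_context_length calculate_context_length_alt
  simp only [pvEstimateTokensB]
  exact pvKey _ (le_max_left _ _)
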